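-- pv_equiv track=rewrite | github.com/molly-101/Algorithm | Algorithm_Prepare/Programmers/Star_Sequence.py | solution
-- ===== SOURCE A (Python) =====
-- def solution(a):
--     memo = {}
--     res = []
--     result = 0
--
--     for i in a:
--         if i not in memo:
--             memo[i] = 1
--         else:
--             memo[i] += 1
--
--     for i in memo.keys():
--         res.append([i, memo[i]])
--     res = sorted(res, key=lambda x: x[1], reverse=True)
--
--     for i in res:
--         if result // 2 < memo[i[0]]:
--             stack = []
--             tmp = []
--             for j in a:
--                 if not tmp:
--                     tmp.append(j)
--                 else:
--                     if (tmp[-1] == i[0] and tmp[-1] != j) or (tmp[-1] != i[0] and j == i[0]):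
--                         tmp.append(j)
--                         stack.append(tmp)
--                         tmp.clear()
--
--             result = max(result, len(stack) * 2)
--         else:
--             break
--
--     return result
-- ===== SOURCE B (Python) =====
-- def solution(a):
--     # One pass: for every value v keep a lazy greedy-automaton state
--     # (cnt pairs, state: 0 = no pending, 1 = pending equals v, 2 = pending differs from v,
--     #  last index of v seen); gaps of non-v elements are applied lazily via index arithmetic.
--     info = {}
--     for idx, j in enumerate(a):
--         if j in info:
--             cnt, st, last = info[j]
--         else:
--             cnt, st, last = 0, 0, -1
--         g = idx - last - 1  # non-v elements since the previous occurrence of j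
--         if st == 1 and g >= 1:      # pending v pairs with the first non-v of the gap
--             cnt += 1
--             st = 2 if g >= 2 else 0
--         elif st == 0 and g >= 1:    # a non-v element becomes the pending element
--             st = 2
--         # now the occurrence of j itself
--         if st == 0:
--             st = 1
--         elif st == 2:               # pending non-v pairs with this v
--             cnt += 1
--             st = 0
--         info[j] = (cnt, st, idx)
--     best = 0
--     n = len(a)
--     for cnt, st, last in info.values():
--         if st == 1 and n - last - 1 >= 1:  # trailing gap pairs off a pending v
--             cnt += 1
--         best = max(best, 2 * cnt)
--     return best
-- ===== Notes on version B (the rewrite author's own statement) =====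
-- stated objective: faster
-- what changed: A counts values into a dict, sorts (value,count) pairs by count descending and, with a result//2 pruning break, re-scans the whole list once per candidate value with tmp/stack list objects; B makes a single pass keeping one lazy greedy-automaton state (pair count, pending-element flag, last index) per distinct value, applying gaps of other elements in O(1) by index arithmetic, then maxes the finalized counts.
import Mathlib
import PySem

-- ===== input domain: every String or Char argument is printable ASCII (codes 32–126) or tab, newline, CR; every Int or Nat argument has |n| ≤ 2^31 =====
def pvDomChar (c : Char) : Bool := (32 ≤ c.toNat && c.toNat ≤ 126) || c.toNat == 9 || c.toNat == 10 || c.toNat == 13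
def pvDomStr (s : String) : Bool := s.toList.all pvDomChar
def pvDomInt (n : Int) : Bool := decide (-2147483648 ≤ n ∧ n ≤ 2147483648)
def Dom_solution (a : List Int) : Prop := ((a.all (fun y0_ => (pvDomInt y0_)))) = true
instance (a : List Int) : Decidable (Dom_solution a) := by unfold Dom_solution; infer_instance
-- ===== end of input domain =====

-- B replaces A's count/sort/prune outer loop with repeated greedy rescans of the whole list by a
-- single pass that drives one lazy greedy automaton per distinct value (objective: faster, one pass).

-- ===== PORT A =====
-- first loop: build memo (counts); Python's `memo[i] += 1` is modify with the key present
def pvMemoStep (d : PySem.Dict Int Int) (i : Int) : PySem.Dict Int Int :=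
  if d.contains i = false then d.insert i 1 else d.modify i 0 (· + 1)

-- inner `for j in a` loop body; state = (stack, tmp); stack.append(tmp); tmp.clear() aliases,
-- so the appended entry is the (then cleared) same object: length is all that is ever read
def pvInnerStep (v : Int) (st : List (List Int) × List Int) (j : Int) :
    List (List Int) × List Int :=
  if st.2 = [] then (st.1, st.2 ++ [j])
  else
    match PySem.List.pyGet? st.2 (-1) with   -- tmp[-1]; tmp nonempty here
    | some last =>
        if (last = v ∧ last ≠ j) ∨ (last ≠ v ∧ j = v) then (st.1 ++ [[]], [])
        else st
    | none => st  -- unreachable (tmp ≠ [])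

-- third loop with its `break`: structural recursion over res
def pvOuter (a : List Int) (memo : PySem.Dict Int Int) :
    List (Int × Int) → Int → Int
  | [], result => result
  | i :: t, result =>
      if PySem.Int.floordiv result 2 < memo.getD i.1 0 then
        let stack := (a.foldl (pvInnerStep i.1) ([], [])).1
        pvOuter a memo t (max result ((stack.length : Int) * 2))
      else result

def solution (a : List Int) : Int :=
  let memo := a.foldl pvMemoStep PySem.Dict.empty
  let res := memo.keys.foldl (fun r i => r ++ [(i, memo.getD i 0)]) []
  let res := PySem.List.sorted res (fun x => x.2) true
  pvOuter a memo res 0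

-- ===== PORT B =====
-- the first  if/elif chain of Source B: apply a gap of g non-v elements to state (cnt, st)
def pvGap (c s g : Int) : Int × Int :=
  if s = 1 ∧ 1 ≤ g then (c + 1, if 2 ≤ g then 2 else 0)
  else if s = 0 ∧ 1 ≤ g then (c, 2)
  else (c, s)

-- the second if/elif chain of Source B: apply the occurrence of v itself
def pvV (q : Int × Int) : Int × Int :=
  if q.2 = 0 then (q.1, 1)
  else if q.2 = 2 then (q.1 + 1, 0)
  else q

-- the loop body: new (cnt, st, last) for value j seen at index idx
def pvAltVal (info : PySem.Dict Int (Int × Int × Int)) (idx j : Int) : Int × Int × Int :=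
  let t := (info.get? j).getD ((0 : Int), (0 : Int), (-1 : Int))  -- `if j in info … else (0,0,-1)`
  let q := pvV (pvGap t.1 t.2.1 (idx - t.2.2 - 1))
  (q.1, q.2, idx)

def solution_alt (a : List Int) : Int :=
  let info := (PySem.List.enumerate a).foldl
    (fun d p => d.insert p.2 (pvAltVal d p.1 p.2)) PySem.Dict.empty
  let n := (a.length : Int)
  info.values.foldl (fun best t =>
    let cnt := if t.2.1 = 1 ∧ 1 ≤ n - t.2.2 - 1 then t.1 + 1 else t.1
    max best (2 * cnt)) 0

-- ===== PRECONDITION & SPEC =====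
def Spec_solution (a : List Int) (out : Int) : Prop := out = solution_alt a
instance (a : List Int) (out : Int) : Decidable (Spec_solution a out) := by unfold Spec_solution; infer_instance

-- ===== CLAIM (what is proved, stated in full; the proofs are below) =====
def Claim_equal_solution : Prop := ∀ (a : List Int), Dom_solution a → Spec_solution a (solution a)

-- ===== LEMMAS AND PROOFS =====

-- the greedy automaton for a single value v, as one explicit fold over the list (proof yardstick:
-- both A's inner scan and B's lazy per-value automaton are shown to compute its pair count)
def pvPairsStep (v : Int) (st : Int × Option Bool) (j : Int) : Int × Option Bool :=
  match st.2 with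
  | none => (st.1, some (j == v))
  | some p => if p ≠ (j == v) then (st.1 + 1, none) else st

def pvPairs (a : List Int) (v : Int) : Int :=
  (a.foldl (pvPairsStep v) ((0 : Int), none)).1

-- A's first loop computes collections.Counter(a)
theorem pvMemoStep_eq_modify (d : PySem.Dict Int Int) (i : Int) :
    pvMemoStep d i = d.modify i 0 (· + 1) := by
  unfold pvMemoStep
  split_ifs with h
  · apply PySem.Dict.ext
    simp [PySem.Dict.items_insert, h, PySem.Dict.modify,
      PySem.Dict.getD_of_not_contains d 0 h]
  · rfl

theorem pvMemo_eq_counter (a : List Int) :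
    a.foldl pvMemoStep PySem.Dict.empty = PySem.Dict.counter a := by
  have hf : pvMemoStep = fun (d : PySem.Dict Int Int) i => d.modify i 0 (· + 1) :=
    funext fun d => funext fun i => pvMemoStep_eq_modify d i
  rw [hf, PySem.Dict.counter_eq_foldl]

-- A's inner scan and the one-value automaton run in lockstep
theorem inner_eq_pairs (v : Int) :
    ∀ (l : List Int) (stack : List (List Int)) (tmp : List Int) (cnt : Int) (pb : Option Bool),
      (stack.length : Int) = cnt →
      (tmp = [] ∧ pb = none ∨ ∃ x, tmp = [x] ∧ pb = some (x == v)) →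
      ((l.foldl (pvInnerStep v) (stack, tmp)).1.length : Int)
        = (l.foldl (pvPairsStep v) (cnt, pb)).1 := by
  intro l
  induction l with
  | nil => intro stack tmp cnt pb hlen hinv; simpa using hlen
  | cons j t ih =>
    intro stack tmp cnt pb hlen hinv
    rcases hinv with ⟨htmp, hpb⟩ | ⟨x, htmp, hpb⟩
    · subst htmp; subst hpb
      simp only [List.foldl_cons, pvInnerStep, pvPairsStep]
      exact ih stack [j] cnt (some (j == v)) hlen (Or.inr ⟨j, rfl, rfl⟩)
    · subst htmp; subst hpb
      simp only [List.foldl_cons]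
      have hget : PySem.List.pyGet? [x] (-1) = some x := by
        simp [PySem.List.pyGet?, PySem.List.pyIdx?]
      have hcond : ((x = v ∧ x ≠ j) ∨ (x ≠ v ∧ j = v)) ↔ ((x == v) ≠ (j == v)) := by
        by_cases hx : x = v <;> by_cases hj : j = v <;> simp [hx, hj] <;> omega
      by_cases hC : (x = v ∧ x ≠ j) ∨ (x ≠ v ∧ j = v)
      · have hC' : ((x == v) ≠ (j == v)) := hcond.mp hC
        simp only [pvInnerStep, pvPairsStep, hget, if_neg (by simp : ¬([x] = ([] : List Int))),
          if_pos hC, if_pos hC']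
        exact ih (stack ++ [[]]) [] (cnt + 1) none (by simp; omega) (Or.inl ⟨rfl, rfl⟩)
      · have hC' : ¬((x == v) ≠ (j == v)) := fun h => hC (hcond.mpr h)
        simp only [pvInnerStep, pvPairsStep, hget, if_neg (by simp : ¬([x] = ([] : List Int))),
          if_neg hC, if_neg hC']
        exact ih stack [x] cnt (some (x == v)) hlen (Or.inr ⟨x, rfl, rfl⟩)

-- each greedy pair contains exactly one occurrence of v
theorem pairsFold_le_count (v : Int) :
    ∀ (l : List Int) (cnt : Int) (pb : Option Bool),
      (l.foldl (pvPairsStep v) (cnt, pb)).1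
        ≤ cnt + (l.count v : Int) + (if pb = some true then 1 else 0) := by
  intro l
  induction l with
  | nil =>
    intro cnt pb
    simp only [List.foldl_nil, List.count_nil]
    split_ifs <;> omega
  | cons j t ih =>
    intro cnt pb
    simp only [List.foldl_cons, List.count_cons]
    by_cases hj : j = v
    · have hbeq : (j == v) = true := by simp [hj]
      cases pb with
      | none =>
        have h1 := ih cnt (some true)
        simp only [pvPairsStep, hbeq] at *
        simp at *
        omega
      | some p =>
        cases p with
        | true =>
          have h1 := ih cnt (some true)
          simp only [pvPairsStep, hbeq] at *
          simp at *
          omega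
        | false =>
          have h1 := ih (cnt + 1) none
          simp only [pvPairsStep, hbeq] at *
          simp at *
          omega
    · have hbeq : (j == v) = false := by simp [hj]
      cases pb with
      | none =>
        have h1 := ih cnt (some false)
        simp only [pvPairsStep, hbeq] at *
        simp at *
        omega
      | some p =>
        cases p with
        | true =>
          have h1 := ih (cnt + 1) none
          simp only [pvPairsStep, hbeq] at *
          simp at *
          omega
        | false =>
          have h1 := ih cnt (some false)
          simp only [pvPairsStep, hbeq] at *
          simp at *
          omega

theorem pvPairs_le_count (a : List Int) (v : Int) : pvPairs a v ≤ (a.count v : Int) := by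
  have := pairsFold_le_count v a 0 none
  rw [pvPairs]
  simpa using this

theorem foldl_max_const (a : List Int) :
    ∀ (l : List (Int × Int)) (r : Int), (∀ p ∈ l, 2 * pvPairs a p.1 ≤ r) →
      l.foldl (fun r p => max r (2 * pvPairs a p.1)) r = r := by
  intro l
  induction l with
  | nil => intro r _; rfl
  | cons p t ih =>
    intro r h
    simp only [List.foldl_cons]
    rw [max_eq_left (h p (List.mem_cons_self ..))]
    exact ih r fun q hq => h q (List.mem_cons_of_mem _ hq)

-- A's sorted-and-pruned loop computes the max over all listed values
theorem pvOuter_eq_foldl (a : List Int) (memo : PySem.Dict Int Int) :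
    ∀ (l : List (Int × Int)) (r : Int),
      l.Pairwise (fun x y => y.2 ≤ x.2) →
      (∀ p ∈ l, memo.getD p.1 0 = p.2 ∧ p.2 = (a.count p.1 : Int)) →
      pvOuter a memo l r = l.foldl (fun r p => max r (2 * pvPairs a p.1)) r := by
  intro l
  induction l with
  | nil => intro r _ _; rfl
  | cons p t ih =>
    intro r hpw hmem
    obtain ⟨hmemo, hcnt⟩ := hmem p (List.mem_cons_self ..)
    have hstack : ((a.foldl (pvInnerStep p.1) ([], [])).1.length : Int) = pvPairs a p.1 := by
      rw [pvPairs]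
      exact inner_eq_pairs p.1 a [] [] 0 none (by simp) (Or.inl ⟨rfl, rfl⟩)
    simp only [pvOuter, hmemo, List.foldl_cons]
    split_ifs with h
    · rw [hstack, mul_comm]
      exact ih _ (List.Pairwise.of_cons hpw) fun q hq => hmem q (List.mem_cons_of_mem _ hq)
    · rw [not_lt] at h
      have h2 : p.2 * 2 ≤ r := (PySem.Int.le_floordiv_iff_mul_le (by norm_num)).mp h
      have hple : ∀ q ∈ p :: t, 2 * pvPairs a q.1 ≤ r := by
        intro q hq
        have hqc : q.2 ≤ p.2 := by
          rcases List.mem_cons.mp hq with rfl | hq'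
          · exact le_rfl
          · exact (List.pairwise_cons.mp hpw).1 q hq'
        have h3 := pvPairs_le_count a q.1
        have hq2 := (hmem q hq).2
        omega
      rw [max_eq_left (hple p (List.mem_cons_self ..))]
      exact (foldl_max_const a t r fun q hq => hple q (List.mem_cons_of_mem _ hq)).symm

-- A's whole program: the max over the distinct values of twice the greedy pair count
theorem solution_eq_max_pairs (a : List Int) :
    solution a = (PySem.Set.ofList a).foldl (fun r k => max r (2 * pvPairs a k)) 0 := by
  simp only [solution]
  rw [pvMemo_eq_counter, PySem.List.foldl_append_singleton_eq_map]
  set memo := PySem.Dict.counter a with hmemo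
  set res0 := memo.keys.map (fun i => (i, memo.getD i 0)) with hres0
  have hperm : (PySem.List.sorted ([] ++ res0) (fun x => x.2) true).Perm res0 := by
    simpa using PySem.List.sorted_perm ([] ++ res0) (fun x => x.2) true
  have hmem : ∀ p ∈ PySem.List.sorted ([] ++ res0) (fun x => x.2) true,
      memo.getD p.1 0 = p.2 ∧ p.2 = (a.count p.1 : Int) := by
    intro p hp
    have hp0 : p ∈ res0 := hperm.mem_iff.mp hp
    rw [hres0] at hp0
    obtain ⟨k, hk, rfl⟩ := List.mem_map.mp hp0
    exact ⟨rfl, by simp [hmemo, PySem.Dict.getD_counter]⟩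
  rw [pvOuter_eq_foldl a memo _ 0
    (PySem.List.sorted_pairwise_rev ([] ++ res0) (fun x => x.2)) hmem]
  have hrc : RightCommutative (fun (r : Int) (p : Int × Int) => max r (2 * pvPairs a p.1)) :=
    ⟨fun b x y => max_right_comm b _ _⟩
  rw [hperm.foldl_eq 0, hres0, List.foldl_map]
  simp [hmemo, PySem.Dict.keys_counter]

-- ---- B side ----

-- entry stored for v (virtual (0,0,-1) when absent), and the automaton state it denotes
def pvEnt (d : PySem.Dict Int (Int × Int × Int)) (v : Int) : Int × Int × Int :=
  (d.get? v).getD ((0 : Int), (0 : Int), (-1 : Int))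

def pvConv (q : Int × Int) : Int × Option Bool :=
  (q.1, if q.2 = 0 then none else if q.2 = 1 then some true else some false)

theorem pvGap_zero (c s : Int) : pvGap c s 0 = (c, s) := by
  simp [pvGap]

theorem pvGap_stOK (c s g : Int) (hs : s = 0 ∨ s = 1) :
    (pvGap c s g).2 = 0 ∨ (pvGap c s g).2 = 1 ∨ (pvGap c s g).2 = 2 := by
  rcases hs with rfl | rfl <;> simp [pvGap] <;> split_ifs <;> simp

theorem pvV_stOK (q : Int × Int) (hs : q.2 = 0 ∨ q.2 = 1 ∨ q.2 = 2) :
    (pvV q).2 = 0 ∨ (pvV q).2 = 1 := by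
  rcases hs with h | h | h <;> simp [pvV, h]

-- applying the element v itself to a denoted state
theorem pvV_step (v : Int) (q : Int × Int) (hs : q.2 = 0 ∨ q.2 = 1 ∨ q.2 = 2) :
    pvPairsStep v (pvConv q) v = pvConv (pvV q) := by
  rcases hs with h | h | h <;>
    simp [pvPairsStep, pvConv, pvV, h]

-- applying one more non-v element extends the pending gap by one
theorem pvGap_step (v j c s g : Int) (hj : j ≠ v) (hg : 0 ≤ g) (hs : s = 0 ∨ s = 1) :
    pvPairsStep v (pvConv (pvGap c s g)) j = pvConv (pvGap c s (g + 1)) := by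
  have hbeq : (j == v) = false := by simp [hj]
  rcases hs with rfl | rfl <;>
    by_cases h1 : (1 : Int) ≤ g <;>
      by_cases h2 : (2 : Int) ≤ g <;>
        simp [pvGap, pvConv, pvPairsStep, hbeq, h1, h2] <;>
          first
            | omega
            | (split_ifs <;> simp_all <;> omega)

-- the single-pass invariant: every stored (or virtual) entry, with its pending gap applied,
-- denotes the state of the one-value automaton after the processed prefix
def pvInv (pre : List Int) (d : PySem.Dict Int (Int × Int × Int)) : Prop :=
  ∀ v : Int,
    ((pvEnt d v).2.1 = 0 ∨ (pvEnt d v).2.1 = 1) ∧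
    (pvEnt d v).2.2 < (pre.length : Int) ∧
    pre.foldl (pvPairsStep v) ((0 : Int), none)
      = pvConv (pvGap (pvEnt d v).1 (pvEnt d v).2.1 ((pre.length : Int) - (pvEnt d v).2.2 - 1))

theorem pvInv_init : pvInv [] PySem.Dict.empty := by
  intro v
  refine ⟨Or.inl rfl, by simp [pvEnt], ?_⟩
  simp [pvEnt, pvConv, pvGap]

theorem pvInv_fold :
    ∀ (l pre : List Int) (d : PySem.Dict Int (Int × Int × Int)), pvInv pre d →
      pvInv (pre ++ l)
        ((PySem.List.enumerate l (pre.length : Int)).foldl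
          (fun d p => d.insert p.2 (pvAltVal d p.1 p.2)) d) := by
  intro l
  induction l with
  | nil => intro pre d h; simpa using h
  | cons j t ih =>
    intro pre d h
    have hrw : PySem.List.enumerate (j :: t) (pre.length : Int)
        = ((pre.length : Int), j) :: PySem.List.enumerate t ((pre.length : Int) + 1) := by
      simp [PySem.List.enumerate]
    rw [hrw]
    simp only [List.foldl_cons]
    have hlen : ((pre ++ [j]).length : Int) = (pre.length : Int) + 1 := by
      simp
    have hstep : pvInv (pre ++ [j]) (d.insert j (pvAltVal d (pre.length : Int) j)) := by
      intro v
      obtain ⟨hsOK, hlt, hfold⟩ := h v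
      by_cases hv : v = j
      · subst hv
        have hent : pvEnt (d.insert v (pvAltVal d (pre.length : Int) v)) v
            = pvAltVal d (pre.length : Int) v := by
          simp [pvEnt]
        have hq : pvAltVal d (pre.length : Int) v
            = ((pvV (pvGap (pvEnt d v).1 (pvEnt d v).2.1
                ((pre.length : Int) - (pvEnt d v).2.2 - 1))).1,
               (pvV (pvGap (pvEnt d v).1 (pvEnt d v).2.1
                ((pre.length : Int) - (pvEnt d v).2.2 - 1))).2,
               (pre.length : Int)) := by
          simp [pvAltVal, pvEnt]
        refine ⟨?_, ?_, ?_⟩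
        · rw [hent, hq]
          exact pvV_stOK _ (pvGap_stOK _ _ _ hsOK)
        · rw [hent, hq]
          simp only [hlen]
          omega
        · rw [hent, hq, List.foldl_append]
          simp only [List.foldl_cons, List.foldl_nil, hlen]
          rw [hfold, pvV_step v _ (pvGap_stOK _ _ _ hsOK)]
          have : (pre.length : Int) + 1 - (pre.length : Int) - 1 = 0 := by omega
          rw [this, pvGap_zero]
      · have hent : pvEnt (d.insert j (pvAltVal d (pre.length : Int) j)) v = pvEnt d v := by
          simp [pvEnt, PySem.Dict.get?_insert, hv]
        refine ⟨hent ▸ hsOK, ?_, ?_⟩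
        · rw [hent, hlen]; omega
        · rw [hent, List.foldl_append]
          simp only [List.foldl_cons, List.foldl_nil, hlen]
          rw [hfold, pvGap_step v j _ _ _ (fun hh => hv hh.symm) (by omega) hsOK]
          have : (pre.length : Int) + 1 - (pvEnt d v).2.2 - 1
              = ((pre.length : Int) - (pvEnt d v).2.2 - 1) + 1 := by omega
          rw [this]
    have := ih (pre ++ [j]) _ hstep
    simpa [List.append_assoc] using this

-- the final per-value read-off: trailing gap applied, first component is the pair count
theorem pairs_of_inv (a : List Int) (d : PySem.Dict Int (Int × Int × Int))
    (h : pvInv a d) (v : Int) :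
    (if (pvEnt d v).2.1 = 1 ∧ 1 ≤ (a.length : Int) - (pvEnt d v).2.2 - 1
      then (pvEnt d v).1 + 1 else (pvEnt d v).1) = pvPairs a v := by
  obtain ⟨hsOK, hlt, hfold⟩ := h v
  have h1 : pvPairs a v
      = (pvConv (pvGap (pvEnt d v).1 (pvEnt d v).2.1
          ((a.length : Int) - (pvEnt d v).2.2 - 1))).1 := by
    rw [pvPairs, hfold]
  rw [h1]
  rcases hsOK with h | h <;>
    simp [pvGap, pvConv, h] <;> split_ifs <;> simp_all

-- ===== VERDICT (by name: the statement is the Claim_ definition above) =====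
theorem solution_spec : Claim_equal_solution := by
  intro a _
  unfold Spec_solution
  show solution a = solution_alt a
  rw [solution_eq_max_pairs]
  simp only [solution_alt]
  set info := (PySem.List.enumerate a).foldl
    (fun d p => d.insert p.2 (pvAltVal d p.1 p.2)) PySem.Dict.empty with hinfo
  have hinv : pvInv a info := by
    have := pvInv_fold a [] PySem.Dict.empty pvInv_init
    simpa using this
  have hnodup : info.keys.Nodup := by
    rw [hinfo]
    exact PySem.Dict.nodup_keys_foldl_insert_key (PySem.List.enumerate a)
      (fun (p : Int × Int) => p.2) (fun d p => pvAltVal d p.1 p.2) PySem.Dict.empty (by simp)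
  have hkeys : info.keys = PySem.Set.ofList a := by
    rw [hinfo]
    rw [PySem.Dict.keys_foldl_insert_key (PySem.List.enumerate a)
      (fun (p : Int × Int) => p.2) (fun d p => pvAltVal d p.1 p.2) PySem.Dict.empty]
    simp [PySem.Set.update, PySem.Set.ofList]
  rw [PySem.Dict.values_eq_map_keys info hnodup ((0 : Int), (0 : Int), (-1 : Int)),
    List.foldl_map]
  have hfun : (fun (best : Int) (k : Int) =>
        max best (2 * (if (info.getD k ((0:Int),(0:Int),(-1:Int))).2.1 = 1 ∧
            1 ≤ (a.length : Int) - (info.getD k ((0:Int),(0:Int),(-1:Int))).2.2 - 1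
          then (info.getD k ((0:Int),(0:Int),(-1:Int))).1 + 1
          else (info.getD k ((0:Int),(0:Int),(-1:Int))).1)))
      = fun best k => max best (2 * pvPairs a k) := by
    funext best k
    have := pairs_of_inv a info hinv k
    simp only [pvEnt, PySem.Dict.getD_eq_get?_getD] at this ⊢
    rw [this]
  rw [hkeys] at *
  rw [hfun]
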